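-- pv_equiv track=rewrite | github.com/thegeneth/Upstreet_Redemption_Helper | completion.py | limit_tokens
-- ===== SOURCE A (Python) =====
-- def simple_token_counter(text):
--     token_count = 0
--     for word in text.split():
--         # Very simplified: count every character or punctuation as a separate token
--         token_count += len(word)
--     return token_count
--
-- def limit_tokens(strings, max_tokens):
--     total_tokens = 0
--     limited_strings = []
--     for string in strings:
--         tokens_in_string = simple_token_counter(string)
--         if total_tokens + tokens_in_string > max_tokens:
--             break
--         total_tokens += tokens_in_string
--         limited_strings.append(string)
--     return limited_strings
-- ===== SOURCE B (Python) =====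
-- from itertools import accumulate
-- from bisect import bisect_right
--
-- def simple_token_counter(text):
--     # tokens = non-whitespace characters (str.split drops exactly the whitespace)
--     return sum(1 for ch in text if not ch.isspace())
--
-- def limit_tokens(strings, max_tokens):
--     # prefix[i] = tokens in the first i strings; counts are >= 0 so prefix is sorted,
--     # and the kept prefix ends just before the first prefix sum exceeding max_tokens,
--     # found by binary search instead of a linear scan with a break.
--     prefix = list(accumulate((simple_token_counter(s) for s in strings), initial=0))
--     k = bisect_right(prefix, max_tokens)
--     return strings[:max(k - 1, 0)]
-- ===== Notes on version B (the rewrite author's own statement) =====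
-- stated objective: alternative
-- what changed: B counts tokens as non-whitespace characters instead of summing split-word lengths, builds the prefix-sum table once (itertools.accumulate with initial=0), and locates the cutoff with bisect_right binary search plus a single slice, replacing A's running-sum loop with an early break.
import Mathlib
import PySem

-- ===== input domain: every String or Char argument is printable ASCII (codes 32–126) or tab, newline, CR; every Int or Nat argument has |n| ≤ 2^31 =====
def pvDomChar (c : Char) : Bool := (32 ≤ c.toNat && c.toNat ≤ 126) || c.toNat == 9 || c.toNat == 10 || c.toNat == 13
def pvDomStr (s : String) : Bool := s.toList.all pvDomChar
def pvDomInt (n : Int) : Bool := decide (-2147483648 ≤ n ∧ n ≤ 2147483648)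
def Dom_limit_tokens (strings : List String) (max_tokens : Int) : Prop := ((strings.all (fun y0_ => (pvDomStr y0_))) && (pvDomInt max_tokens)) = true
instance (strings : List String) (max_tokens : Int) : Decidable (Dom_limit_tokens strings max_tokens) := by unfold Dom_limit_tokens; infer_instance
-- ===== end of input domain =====

-- B counts tokens as non-whitespace characters, builds prefix sums once and finds the cutoff with bisect_right (binary search) plus one slice, instead of A's running-sum loop with a break; objective: alternative (same asymptotic cost).


-- ===== PORT A =====
-- simple_token_counter: loop over text.split() accumulating len(word)
def simple_token_counter (text : String) : Int :=
  (PySem.Str.split₀ text).foldl (fun token_count word => token_count + PySem.Str.len word) 0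

-- the for-loop with its permanent break, as structural recursion carrying total_tokens
def limitTokensGo (max_tokens total_tokens : Int) : List String → List String
  | [] => []
  | s :: rest =>
    let tokens_in_string := simple_token_counter s
    if total_tokens + tokens_in_string > max_tokens then []
    else s :: limitTokensGo max_tokens (total_tokens + tokens_in_string) rest

def limit_tokens (strings : List String) (max_tokens : Int) : List String :=
  limitTokensGo max_tokens 0 strings

-- ===== PORT B =====
-- B's counter: sum(1 for ch in text if not ch.isspace())  — a 0/1 sum IS countP
def simple_token_counter_alt (text : String) : Int :=
  ((text.toList.countP (fun ch => !(PySem.Chars.isspace ch)) : Nat) : Int)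

-- itertools.accumulate(counts): running sums continuing from acc (the `initial=0` element is consed on at the use site)
def pyAccumulate (acc : Int) : List Int → List Int
  | [] => []
  | c :: cs => (acc + c) :: pyAccumulate (acc + c) cs

def limit_tokens_alt (strings : List String) (max_tokens : Int) : List String :=
  let prefixSums := 0 :: pyAccumulate 0 (strings.map simple_token_counter_alt)
  let k : Int := (PySem.List.bisectRight prefixSums max_tokens : Int)
  -- strings[:m] with m = max(k-1, 0) ≥ 0 is exactly List.take m
  strings.take (max (k - 1) 0).toNat

-- ===== PRECONDITION & SPEC =====
def Spec_limit_tokens (strings : List String) (max_tokens : Int) (out : List String) : Prop := out = limit_tokens_alt strings max_tokens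
instance (strings : List String) (max_tokens : Int) (out : List String) : Decidable (Spec_limit_tokens strings max_tokens out) := by unfold Spec_limit_tokens; infer_instance

-- ===== CLAIM (what is proved, stated in full; the proofs are below) =====
def Claim_equal_limit_tokens : Prop := ∀ (strings : List String) (max_tokens : Int), Dom_limit_tokens strings max_tokens → Spec_limit_tokens strings max_tokens (limit_tokens strings max_tokens)

-- ===== LEMMAS AND PROOFS =====

-- sum of word lengths produced by split₀.go, as a function of its state
theorem go_len_sum : ∀ (rest cur : List Char) (acc : List (List Char)),
    ((PySem.Chars.split₀.go rest cur acc).map List.length).sum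
      = (acc.map List.length).sum + cur.length + rest.countP (fun c => !PySem.Chars.isspace c) := by
  intro rest
  induction rest with
  | nil =>
    intro cur acc
    simp only [PySem.Chars.split₀.go]
    by_cases h : cur.isEmpty
    · simp [List.isEmpty_iff.mp h]
    · simp [h, List.sum_reverse]
  | cons c rest ih =>
    intro cur acc
    simp only [PySem.Chars.split₀.go]
    by_cases hsp : PySem.Chars.isspace c
    · by_cases hc : cur.isEmpty
      · simp [hsp, ih, List.isEmpty_iff.mp hc]
      · simp [hsp, hc, ih]; omega
    · simp [hsp, ih]; omega

-- split() keeps exactly the non-whitespace characters, so the word lengths sum to their count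
theorem split₀_len_sum (cs : List Char) :
    ((PySem.Chars.split₀ cs).map List.length).sum = cs.countP (fun c => !PySem.Chars.isspace c) := by
  simpa using go_len_sum cs [] []

-- the two counters agree on every string
theorem counter_eq (text : String) : simple_token_counter text = simple_token_counter_alt text := by
  unfold simple_token_counter simple_token_counter_alt
  rw [PySem.List.foldl_add]
  simp only [PySem.Str.split₀, List.map_map, ← split₀_len_sum, zero_add]
  rw [show (PySem.Str.len ∘ String.ofList) = (fun l : List Char => (l.length : Int)) by
        funext l; simp [PySem.Str.len_eq]]
  rw [Nat.cast_list_sum, List.map_map]; rfl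

theorem counter_nonneg (text : String) : 0 ≤ simple_token_counter_alt text := by
  unfold simple_token_counter_alt; positivity

-- prefix sums of nonnegative counts, seeded at t, form a sorted list starting at t
theorem accum_sorted : ∀ (cs : List Int) (t : Int), (∀ c ∈ cs, 0 ≤ c) →
    List.Pairwise (fun a b => a ≤ b) (t :: pyAccumulate t cs) := by
  intro cs
  induction cs with
  | nil => intro t _; simp [pyAccumulate]
  | cons c cs ih =>
    intro t h
    have h0 : 0 ≤ c := h c (by simp)
    have ht := ih (t + c) (fun d hd => h d (by simp [hd]))
    simp only [pyAccumulate]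
    constructor
    · intro b hb
      rcases List.mem_cons.mp hb with rfl | hb
      · omega
      · have := (List.pairwise_cons.mp ht).1 b hb; omega
    · exact ht

-- every element admitted by takeWhile satisfies the predicate
theorem takeWhile_getElem (p : Int → Bool) : ∀ (a : List Int) (j : Nat) (hj : j < a.length),
    j < (a.takeWhile p).length → p a[j] = true := by
  intro a
  induction a with
  | nil => intro j hj; simp at hj
  | cons x xs ih =>
    intro j hj h
    by_cases hp : p x
    · cases j with
      | zero => simpa using hp
      | succ j => simp only [List.takeWhile_cons, hp, if_true, List.length_cons] at h
                  simpa using ih j (by simpa using hj) (by omega)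
    · simp [hp] at h

-- the element right after the takeWhile prefix fails the predicate
theorem takeWhile_first_fail (p : Int → Bool) : ∀ (a : List Int) (h : (a.takeWhile p).length < a.length),
    p (a[(a.takeWhile p).length]) = false := by
  intro a
  induction a with
  | nil => intro h; simp at h
  | cons x xs ih =>
    intro h
    by_cases hp : p x
    · simp only [List.takeWhile_cons, hp, if_true, List.length_cons] at h ⊢
      simpa using ih (by omega)
    · simp [hp]

-- bisectRight on a sorted list returns the length of its (≤ x)-takeWhile prefix
theorem bisect_eq_takeWhile (a : List Int) (x : Int) (hs : List.Pairwise (fun p q => p ≤ q) a) :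
    PySem.List.bisectRight a x = (a.takeWhile (fun v => v ≤ x)).length := by
  obtain ⟨hle, h1, h2⟩ := PySem.List.bisectRight_spec a x hs
  set r := PySem.List.bisectRight a x with hr
  set K := (a.takeWhile (fun v => decide (v ≤ x))).length with hK
  have hKle : K ≤ a.length := by
    simpa using List.IsPrefix.length_le (List.takeWhile_prefix _)
  rcases lt_trichotomy r K with h | h | h
  · exfalso
    have hrlt : r < a.length := lt_of_lt_of_le h hKle
    have hA := takeWhile_getElem (fun v => decide (v ≤ x)) a r hrlt h
    have hB := h2 r hrlt le_rfl
    simp at hA; omega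
  · exact h
  · exfalso
    have hKlt : K < a.length := lt_of_lt_of_le h hle
    have hA := takeWhile_first_fail (fun v => decide (v ≤ x)) a hKlt
    have hB := h1 K hKlt h
    simp at hA; exact absurd hB (not_le.mpr hA)

-- A's loop takes the longest prefix whose running sums (seeded at t) stay ≤ max_tokens
theorem go_eq_take (max_tokens : Int) : ∀ (l : List String) (t : Int),
    limitTokensGo max_tokens t l =
      l.take ((pyAccumulate t (l.map simple_token_counter_alt)).takeWhile
        (fun v => v ≤ max_tokens)).length := by
  intro l
  induction l with
  | nil => intro t; simp [limitTokensGo, pyAccumulate]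
  | cons s rest ih =>
    intro t
    simp only [limitTokensGo, List.map_cons, pyAccumulate, List.takeWhile_cons, counter_eq]
    by_cases h : t + simple_token_counter_alt s ≤ max_tokens
    · rw [if_neg (by omega)]
      simp [h, ih]
    · rw [if_pos (by omega)]
      simp [h]

-- ===== VERDICT (by name: the statement is the Claim_ definition above) =====
theorem limit_tokens_spec : Claim_equal_limit_tokens := by
  intro strings max_tokens _
  unfold Spec_limit_tokens limit_tokens limit_tokens_alt
  have hnn : ∀ c ∈ strings.map simple_token_counter_alt, 0 ≤ c := by
    intro c hc
    rcases List.mem_map.mp hc with ⟨s, _, rfl⟩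
    exact counter_nonneg s
  show limitTokensGo max_tokens 0 strings =
    List.take (max ((PySem.List.bisectRight
        (0 :: pyAccumulate 0 (strings.map simple_token_counter_alt)) max_tokens : Int) - 1) 0).toNat strings
  rw [bisect_eq_takeWhile _ _ (accum_sorted _ 0 hnn), go_eq_take]
  simp only [List.takeWhile_cons]
  by_cases hx : (0 : Int) ≤ max_tokens
  · simp only [hx, decide_true, if_true, List.length_cons]
    congr 1
    push_cast
    omega
  · simp only [hx, decide_false, Bool.false_eq_true, if_false, List.length_nil]
    have hz : ((max (((0:Nat):Int) - 1) 0).toNat) = 0 := by decide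
    rw [hz, List.take_zero]
    cases strings with
    | nil => simp
    | cons s rest =>
      have hc : ¬ (0 + simple_token_counter_alt s ≤ max_tokens) := by
        have := counter_nonneg s; omega
      simp only [List.map_cons, pyAccumulate, List.takeWhile_cons]
      rw [if_neg (by simpa using hc)]
      simp
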